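-- pv_equiv track=rewrite | github.com/marlevek/app-smarthvac | assistente/engine_logic.py | gerar_diagnostico_basico
-- ===== SOURCE A (Python) =====
-- def gerar_diagnostico_basico(
--     sintomas: str,
--     marca_equipamento: str,
--     tipo_equipamento: str,
--     fluido: str,
-- ) -> str:
--     """
--     Gera um diagnóstico de exemplo baseado em regras simples.
--     Isso é só o "motor" do MVP sem IA.
--     """
--
--     sintomas_lower = (sintomas or "").lower()
--
--     # Cabeçalho comum com contexto
--     cabecalho = (
--         "Exemplo de resposta do SmartHVAC Assist.\n\n"
--         "Contexto informado:\n"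
--         f"- Marca: {marca_equipamento or 'não informado'}\n"
--         f"- Tipo de equipamento: {tipo_equipamento or 'não informado'}\n"
--         f"- Fluido: {fluido or 'não informado'}\n\n"
--     )
--
--     # Caso 1 – Evaporadora pingando / vazando água
--     if any(palavra in sintomas_lower for palavra in ["pinga", "pingando", "vazando água", "vazando agua"]):
--         corpo = (
--             "Possíveis causas (evaporadora pingando):\n"
--             "1. Bandeja de dreno desnivelada ou obstruída.\n"
--             "2. Mangueira de dreno estrangulada ou com sifão invertido.\n"
--             "3. Excesso de condensação por diferença de temperatura muito alta.\n"
--             "4. Entrada de ar falso pelo rasgo da tubulação ou frestas na parede.\n\n"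
--             "Passos recomendados para verificação:\n"
--             "• Conferir inclinação da evaporadora e da bandeja com nível.\n"
--             "• Desconectar e testar escoamento da mangueira de dreno.\n"
--             "• Verificar vedação do rasgo da tubulação (massa, espuma, etc.).\n"
--             "• Observar se a bandeja enche rápido demais em operação contínua.\n"
--         )
--         return cabecalho + corpo
--
--     # Caso 2 – Freezer / câmara não atinge temperatura (ex.: -28°C)
--     if any(p in sintomas_lower for p in ["não atinge", "nao atinge", "-28", "não chega", "nao chega", "temperatura alta"]):
--         corpo = (
--             "Possíveis causas (freezer/câmara não atingindo temperatura):\n"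
--             "1. Carga de fluido refrigerante baixa ou excesso de fluido.\n"
--             "2. Sujeira em condensador (ar ou água) prejudicando a troca térmica.\n"
--             "3. Isolamento térmico comprometido (borracha de porta, frestas, etc.).\n"
--             "4. Termostato/controlador desajustado ou com histerese inadequada.\n\n"
--             "Passos recomendados para verificação:\n"
--             "• Verificar pressão de sucção e descarga e comparar com tabela do fluido.\n"
--             "• Inspecionar condensador e ventiladores (limpeza e rotação).\n"
--             "• Conferir vedação da porta e presença de gelo em excesso no evaporador.\n"
--             "• Verificar setpoint e histerese no controlador eletrônico.\n"
--         )
--         return cabecalho + corpo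
--
--     # Caso 3 – Não gela / baixa capacidade em split
--     if any(p in sintomas_lower for p in ["não gela", "nao gela", "fraco", "pouco frio"]):
--         corpo = (
--             "Possíveis causas (baixa capacidade de refrigeração):\n"
--             "1. Filtro de ar sujo ou evaporadora muito suja.\n"
--             "2. Condensadora obstruída ou com ventilação inadequada.\n"
--             "3. Carga de fluido fora do ideal (baixa ou alta).\n"
--             "4. Dimensionamento inadequado para o ambiente (BTUs insuficientes).\n\n"
--             "Passos recomendados para verificação:\n"
--             "• Verificar limpeza de filtros e serpentina da evaporadora.\n"
--             "• Conferir se há obstruções no fluxo de ar da condensadora.\n"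
--             "• Medir pressões e temperaturas, comparando com tabela do fluido.\n"
--             "• Confirmar carga térmica do ambiente versus capacidade do equipamento.\n"
--         )
--         return cabecalho + corpo
--
--     # Caso padrão (fallback)
--     corpo = (
--         "No momento, não encontrei um padrão claro pelos sintomas informados.\n\n"
--         "Sugestão de próximos passos:\n"
--         "1. Detalhe melhor os sintomas (tempo de funcionamento, ruídos, pressões, temperaturas).\n"
--         "2. Informe se o problema é intermitente ou constante.\n"
--         "3. Quando possível, registre:\n"
--         "   • Pressão de sucção e descarga.\n"
--         "   • Temperatura de retorno e de insuflamento.\n"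
--         "   • Corrente do compressor.\n\n"
--         "Com mais detalhes, o SmartHVAC Assist poderá sugerir um caminho mais específico de diagnóstico.\n"
--     )
--     return cabecalho + corpo
-- ===== SOURCE B (Python) =====
-- # Different algorithm: instead of an ordered chain of branch tests with early
-- # return, B flattens all keywords into one keyword->priority map, computes the
-- # minimum priority among ALL matching keywords (default = fallback), and indexes
-- # a body table.  Correct because rule order in A is exactly priority order.
--
-- _CORPOS = [
--     (
--         "Possíveis causas (evaporadora pingando):\n"
--         "1. Bandeja de dreno desnivelada ou obstruída.\n"
--         "2. Mangueira de dreno estrangulada ou com sifão invertido.\n"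
--         "3. Excesso de condensação por diferença de temperatura muito alta.\n"
--         "4. Entrada de ar falso pelo rasgo da tubulação ou frestas na parede.\n\n"
--         "Passos recomendados para verificação:\n"
--         "• Conferir inclinação da evaporadora e da bandeja com nível.\n"
--         "• Desconectar e testar escoamento da mangueira de dreno.\n"
--         "• Verificar vedação do rasgo da tubulação (massa, espuma, etc.).\n"
--         "• Observar se a bandeja enche rápido demais em operação contínua.\n"
--     ),
--     (
--         "Possíveis causas (freezer/câmara não atingindo temperatura):\n"
--         "1. Carga de fluido refrigerante baixa ou excesso de fluido.\n"
--         "2. Sujeira em condensador (ar ou água) prejudicando a troca térmica.\n"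
--         "3. Isolamento térmico comprometido (borracha de porta, frestas, etc.).\n"
--         "4. Termostato/controlador desajustado ou com histerese inadequada.\n\n"
--         "Passos recomendados para verificação:\n"
--         "• Verificar pressão de sucção e descarga e comparar com tabela do fluido.\n"
--         "• Inspecionar condensador e ventiladores (limpeza e rotação).\n"
--         "• Conferir vedação da porta e presença de gelo em excesso no evaporador.\n"
--         "• Verificar setpoint e histerese no controlador eletrônico.\n"
--     ),
--     (
--         "Possíveis causas (baixa capacidade de refrigeração):\n"
--         "1. Filtro de ar sujo ou evaporadora muito suja.\n"
--         "2. Condensadora obstruída ou com ventilação inadequada.\n"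
--         "3. Carga de fluido fora do ideal (baixa ou alta).\n"
--         "4. Dimensionamento inadequado para o ambiente (BTUs insuficientes).\n\n"
--         "Passos recomendados para verificação:\n"
--         "• Verificar limpeza de filtros e serpentina da evaporadora.\n"
--         "• Conferir se há obstruções no fluxo de ar da condensadora.\n"
--         "• Medir pressões e temperaturas, comparando com tabela do fluido.\n"
--         "• Confirmar carga térmica do ambiente versus capacidade do equipamento.\n"
--     ),
--     (
--         "No momento, não encontrei um padrão claro pelos sintomas informados.\n\n"
--         "Sugestão de próximos passos:\n"
--         "1. Detalhe melhor os sintomas (tempo de funcionamento, ruídos, pressões, temperaturas).\n"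
--         "2. Informe se o problema é intermitente ou constante.\n"
--         "3. Quando possível, registre:\n"
--         "   • Pressão de sucção e descarga.\n"
--         "   • Temperatura de retorno e de insuflamento.\n"
--         "   • Corrente do compressor.\n\n"
--         "Com mais detalhes, o SmartHVAC Assist poderá sugerir um caminho mais específico de diagnóstico.\n"
--     ),
-- ]
--
-- # keyword -> priority of the diagnostic body it triggers
-- _CASOS = {
--     "pinga": 0, "pingando": 0, "vazando água": 0, "vazando agua": 0,
--     "não atinge": 1, "nao atinge": 1, "-28": 1, "não chega": 1,
--     "nao chega": 1, "temperatura alta": 1,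
--     "não gela": 2, "nao gela": 2, "fraco": 2, "pouco frio": 2,
-- }
--
--
-- def gerar_diagnostico_basico(
--     sintomas: str,
--     marca_equipamento: str,
--     tipo_equipamento: str,
--     fluido: str,
-- ) -> str:
--     sintomas_lower = (sintomas or "").lower()
--     cabecalho = (
--         "Exemplo de resposta do SmartHVAC Assist.\n\n"
--         "Contexto informado:\n"
--         f"- Marca: {marca_equipamento or 'não informado'}\n"
--         f"- Tipo de equipamento: {tipo_equipamento or 'não informado'}\n"
--         f"- Fluido: {fluido or 'não informado'}\n\n"
--     )
--     idx = min((i for p, i in _CASOS.items() if p in sintomas_lower), default=3)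
--     return cabecalho + _CORPOS[idx]
-- ===== Notes on version B (the rewrite author's own statement) =====
-- stated objective: alternative
-- what changed: A's ordered chain of branch tests with early return is replaced by a flat keyword-to-priority map: B computes the minimum priority over all matching keywords (default = fallback index) and indexes a body table, which is correct because A's rule order is exactly priority order.
import Mathlib
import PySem

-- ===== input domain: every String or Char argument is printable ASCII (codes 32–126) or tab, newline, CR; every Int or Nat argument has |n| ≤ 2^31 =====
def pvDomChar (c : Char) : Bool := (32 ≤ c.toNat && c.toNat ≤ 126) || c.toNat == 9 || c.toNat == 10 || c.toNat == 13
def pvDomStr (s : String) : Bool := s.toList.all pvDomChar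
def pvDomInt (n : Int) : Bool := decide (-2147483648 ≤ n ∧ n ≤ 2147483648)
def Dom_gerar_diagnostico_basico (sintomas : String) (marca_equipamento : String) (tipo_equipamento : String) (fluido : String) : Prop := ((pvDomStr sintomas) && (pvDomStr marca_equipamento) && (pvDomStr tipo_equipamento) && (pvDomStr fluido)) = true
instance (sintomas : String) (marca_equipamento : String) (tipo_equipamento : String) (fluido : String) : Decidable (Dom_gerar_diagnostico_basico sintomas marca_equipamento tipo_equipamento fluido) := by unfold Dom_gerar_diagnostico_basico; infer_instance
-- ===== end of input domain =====

-- B replaces A's ordered if-chain (early return) by a flat keyword->priority map: it takes the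
-- minimum priority over all matching keywords (default = fallback) and indexes a body table (alternative).
-- ===== PORT A =====
-- Literal transliteration of A: header, then an if-chain of three keyword tests.
def gerar_diagnostico_basico (sintomas : String) (marca_equipamento : String) (tipo_equipamento : String) (fluido : String) : String :=
  let sintomas_lower := PySem.Str.lower (if sintomas == "" then "" else sintomas)
  let cabecalho :=
    "Exemplo de resposta do SmartHVAC Assist.\n\nContexto informado:\n- Marca: "
      ++ (if marca_equipamento == "" then "não informado" else marca_equipamento)
      ++ "\n- Tipo de equipamento: "
      ++ (if tipo_equipamento == "" then "não informado" else tipo_equipamento)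
      ++ "\n- Fluido: "
      ++ (if fluido == "" then "não informado" else fluido)
      ++ "\n\n"
  if (["pinga", "pingando", "vazando água", "vazando agua"] : List String).any (fun palavra => PySem.Str.isIn palavra sintomas_lower) then
    let corpo := "Possíveis causas (evaporadora pingando):\n1. Bandeja de dreno desnivelada ou obstruída.\n2. Mangueira de dreno estrangulada ou com sifão invertido.\n3. Excesso de condensação por diferença de temperatura muito alta.\n4. Entrada de ar falso pelo rasgo da tubulação ou frestas na parede.\n\nPassos recomendados para verificação:\n• Conferir inclinação da evaporadora e da bandeja com nível.\n• Desconectar e testar escoamento da mangueira de dreno.\n• Verificar vedação do rasgo da tubulação (massa, espuma, etc.).\n• Observar se a bandeja enche rápido demais em operação contínua.\n"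
    cabecalho ++ corpo
  else if (["não atinge", "nao atinge", "-28", "não chega", "nao chega", "temperatura alta"] : List String).any (fun p => PySem.Str.isIn p sintomas_lower) then
    let corpo := "Possíveis causas (freezer/câmara não atingindo temperatura):\n1. Carga de fluido refrigerante baixa ou excesso de fluido.\n2. Sujeira em condensador (ar ou água) prejudicando a troca térmica.\n3. Isolamento térmico comprometido (borracha de porta, frestas, etc.).\n4. Termostato/controlador desajustado ou com histerese inadequada.\n\nPassos recomendados para verificação:\n• Verificar pressão de sucção e descarga e comparar com tabela do fluido.\n• Inspecionar condensador e ventiladores (limpeza e rotação).\n• Conferir vedação da porta e presença de gelo em excesso no evaporador.\n• Verificar setpoint e histerese no controlador eletrônico.\n"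
    cabecalho ++ corpo
  else if (["não gela", "nao gela", "fraco", "pouco frio"] : List String).any (fun p => PySem.Str.isIn p sintomas_lower) then
    let corpo := "Possíveis causas (baixa capacidade de refrigeração):\n1. Filtro de ar sujo ou evaporadora muito suja.\n2. Condensadora obstruída ou com ventilação inadequada.\n3. Carga de fluido fora do ideal (baixa ou alta).\n4. Dimensionamento inadequado para o ambiente (BTUs insuficientes).\n\nPassos recomendados para verificação:\n• Verificar limpeza de filtros e serpentina da evaporadora.\n• Conferir se há obstruções no fluxo de ar da condensadora.\n• Medir pressões e temperaturas, comparando com tabela do fluido.\n• Confirmar carga térmica do ambiente versus capacidade do equipamento.\n"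
    cabecalho ++ corpo
  else
    let corpo := "No momento, não encontrei um padrão claro pelos sintomas informados.\n\nSugestão de próximos passos:\n1. Detalhe melhor os sintomas (tempo de funcionamento, ruídos, pressões, temperaturas).\n2. Informe se o problema é intermitente ou constante.\n3. Quando possível, registre:\n   • Pressão de sucção e descarga.\n   • Temperatura de retorno e de insuflamento.\n   • Corrente do compressor.\n\nCom mais detalhes, o SmartHVAC Assist poderá sugerir um caminho mais específico de diagnóstico.\n"
    cabecalho ++ corpo

-- ===== PORT B =====
-- B: minimum priority over all matching keywords of a flat keyword->priority table, then index a body list.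
def pvCorpos : List String :=
  [ "Possíveis causas (evaporadora pingando):\n1. Bandeja de dreno desnivelada ou obstruída.\n2. Mangueira de dreno estrangulada ou com sifão invertido.\n3. Excesso de condensação por diferença de temperatura muito alta.\n4. Entrada de ar falso pelo rasgo da tubulação ou frestas na parede.\n\nPassos recomendados para verificação:\n• Conferir inclinação da evaporadora e da bandeja com nível.\n• Desconectar e testar escoamento da mangueira de dreno.\n• Verificar vedação do rasgo da tubulação (massa, espuma, etc.).\n• Observar se a bandeja enche rápido demais em operação contínua.\n"
  , "Possíveis causas (freezer/câmara não atingindo temperatura):\n1. Carga de fluido refrigerante baixa ou excesso de fluido.\n2. Sujeira em condensador (ar ou água) prejudicando a troca térmica.\n3. Isolamento térmico comprometido (borracha de porta, frestas, etc.).\n4. Termostato/controlador desajustado ou com histerese inadequada.\n\nPassos recomendados para verificação:\n• Verificar pressão de sucção e descarga e comparar com tabela do fluido.\n• Inspecionar condensador e ventiladores (limpeza e rotação).\n• Conferir vedação da porta e presença de gelo em excesso no evaporador.\n• Verificar setpoint e histerese no controlador eletrônico.\n"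
  , "Possíveis causas (baixa capacidade de refrigeração):\n1. Filtro de ar sujo ou evaporadora muito suja.\n2. Condensadora obstruída ou com ventilação inadequada.\n3. Carga de fluido fora do ideal (baixa ou alta).\n4. Dimensionamento inadequado para o ambiente (BTUs insuficientes).\n\nPassos recomendados para verificação:\n• Verificar limpeza de filtros e serpentina da evaporadora.\n• Conferir se há obstruções no fluxo de ar da condensadora.\n• Medir pressões e temperaturas, comparando com tabela do fluido.\n• Confirmar carga térmica do ambiente versus capacidade do equipamento.\n"
  , "No momento, não encontrei um padrão claro pelos sintomas informados.\n\nSugestão de próximos passos:\n1. Detalhe melhor os sintomas (tempo de funcionamento, ruídos, pressões, temperaturas).\n2. Informe se o problema é intermitente ou constante.\n3. Quando possível, registre:\n   • Pressão de sucção e descarga.\n   • Temperatura de retorno e de insuflamento.\n   • Corrente do compressor.\n\nCom mais detalhes, o SmartHVAC Assist poderá sugerir um caminho mais específico de diagnóstico.\n" ]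

-- the _CASOS dict of Source B: keyword -> priority, in insertion order
def pvCasos : List (String × Nat) :=
  [ ("pinga", 0), ("pingando", 0), ("vazando água", 0), ("vazando agua", 0)
  , ("não atinge", 1), ("nao atinge", 1), ("-28", 1), ("não chega", 1)
  , ("nao chega", 1), ("temperatura alta", 1)
  , ("não gela", 2), ("nao gela", 2), ("fraco", 2), ("pouco frio", 2) ]

-- Python's min(iterable, default=d): first element folded with min, or d when empty
def pyMinDefault (l : List Nat) (d : Nat) : Nat :=
  match l with
  | [] => d
  | x :: xs => xs.foldl min x

def gerar_diagnostico_basico_alt (sintomas : String) (marca_equipamento : String) (tipo_equipamento : String) (fluido : String) : String :=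
  let sintomas_lower := PySem.Str.lower (if sintomas == "" then "" else sintomas)
  let cabecalho :=
    "Exemplo de resposta do SmartHVAC Assist.\n\nContexto informado:\n- Marca: "
      ++ (if marca_equipamento == "" then "não informado" else marca_equipamento)
      ++ "\n- Tipo de equipamento: "
      ++ (if tipo_equipamento == "" then "não informado" else tipo_equipamento)
      ++ "\n- Fluido: "
      ++ (if fluido == "" then "não informado" else fluido)
      ++ "\n\n"
  let idx := pyMinDefault ((pvCasos.filter (fun q => PySem.Str.isIn q.1 sintomas_lower)).map Prod.snd) 3
  -- _CORPOS[idx]: idx ≤ 3 always, the index is in range, so getD is exact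
  cabecalho ++ pvCorpos.getD idx ""

-- ===== PRECONDITION & SPEC =====
def Spec_gerar_diagnostico_basico (sintomas : String) (marca_equipamento : String) (tipo_equipamento : String) (fluido : String) (out : String) : Prop := out = gerar_diagnostico_basico_alt sintomas marca_equipamento tipo_equipamento fluido
instance (sintomas : String) (marca_equipamento : String) (tipo_equipamento : String) (fluido : String) (out : String) : Decidable (Spec_gerar_diagnostico_basico sintomas marca_equipamento tipo_equipamento fluido out) := by unfold Spec_gerar_diagnostico_basico; infer_instance

-- ===== CLAIM =====
def Claim_equal_gerar_diagnostico_basico : Prop := ∀ (sintomas : String) (marca_equipamento : String) (tipo_equipamento : String) (fluido : String), Dom_gerar_diagnostico_basico sintomas marca_equipamento tipo_equipamento fluido → Spec_gerar_diagnostico_basico sintomas marca_equipamento tipo_equipamento fluido (gerar_diagnostico_basico sintomas marca_equipamento tipo_equipamento fluido)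

-- ===== LEMMAS AND PROOFS =====

-- min(xs, default=d) = foldl min d xs when every element is ≤ d
theorem pyMinDefault_eq_foldl (l : List Nat) (d : Nat) (h : ∀ x ∈ l, x ≤ d) :
    pyMinDefault l d = l.foldl min d := by
  cases l with
  | nil => rfl
  | cons x xs =>
    have hx : min d x = x := min_eq_right (h x (List.mem_cons_self ..))
    simp [pyMinDefault, List.foldl_cons, hx]

-- folding min over one keyword group (all priority i): min acc i if any keyword matches, else acc
theorem foldmin_group (f : String → Bool) (ps : List String) (i : Nat) :
    ∀ acc : Nat,
      ((((ps.map (fun p => (p, i))).filter (fun q => f q.1)).map Prod.snd).foldl min acc)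
        = if ps.any f then min acc i else acc := by
  induction ps with
  | nil => intro acc; simp
  | cons p rest ih =>
    intro acc
    simp only [List.map_cons, List.filter_cons, List.any_cons]
    by_cases h : f p = true
    · rw [if_pos h]
      simp only [List.map_cons, List.foldl_cons, ih (min acc i), h, Bool.true_or, if_true]
      split
      · rw [min_assoc]; simp
      · rfl
    · rw [if_neg h]
      have h' : f p = false := by simpa using h
      simp [h', ih acc]

-- the selection cores agree for every lowered symptom string and header
theorem core_eq (s cab : String) :
    (if (["pinga", "pingando", "vazando água", "vazando agua"] : List String).any (fun p => PySem.Str.isIn p s) then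
        cab ++ pvCorpos.getD 0 ""
      else if (["não atinge", "nao atinge", "-28", "não chega", "nao chega", "temperatura alta"] : List String).any (fun p => PySem.Str.isIn p s) then
        cab ++ pvCorpos.getD 1 ""
      else if (["não gela", "nao gela", "fraco", "pouco frio"] : List String).any (fun p => PySem.Str.isIn p s) then
        cab ++ pvCorpos.getD 2 ""
      else cab ++ pvCorpos.getD 3 "")
    = cab ++ pvCorpos.getD (pyMinDefault ((pvCasos.filter (fun q => PySem.Str.isIn q.1 s)).map Prod.snd) 3) "" := by
  have hbound : ∀ x ∈ (pvCasos.filter (fun q => PySem.Str.isIn q.1 s)).map Prod.snd, x ≤ 3 := by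
    intro x hx
    rcases List.mem_map.1 hx with ⟨q, hq, rfl⟩
    have hq' := (List.mem_filter.1 hq).1
    have : q.2 ∈ pvCasos.map Prod.snd := List.mem_map_of_mem hq'
    simp [pvCasos] at this
    omega
  rw [pyMinDefault_eq_foldl _ _ hbound]
  have hsplit : pvCasos
      = ((["pinga", "pingando", "vazando água", "vazando agua"] : List String).map (fun p => (p, 0)))
        ++ ((["não atinge", "nao atinge", "-28", "não chega", "nao chega", "temperatura alta"] : List String).map (fun p => (p, 1)))
        ++ ((["não gela", "nao gela", "fraco", "pouco frio"] : List String).map (fun p => (p, 2))) := rfl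
  rw [hsplit, List.filter_append, List.filter_append, List.map_append, List.map_append,
      List.foldl_append, List.foldl_append,
      foldmin_group (fun p => PySem.Str.isIn p s), foldmin_group (fun p => PySem.Str.isIn p s),
      foldmin_group (fun p => PySem.Str.isIn p s)]
  generalize (["pinga", "pingando", "vazando água", "vazando agua"] : List String).any (fun p => PySem.Str.isIn p s) = b1
  generalize (["não atinge", "nao atinge", "-28", "não chega", "nao chega", "temperatura alta"] : List String).any (fun p => PySem.Str.isIn p s) = b2
  generalize (["não gela", "nao gela", "fraco", "pouco frio"] : List String).any (fun p => PySem.Str.isIn p s) = b3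
  cases b1 <;> cases b2 <;> cases b3 <;> simp [pvCorpos]

-- ===== VERDICT =====
theorem gerar_diagnostico_basico_spec : Claim_equal_gerar_diagnostico_basico := by
  intro sintomas marca tipo fluido _
  unfold Spec_gerar_diagnostico_basico gerar_diagnostico_basico gerar_diagnostico_basico_alt
  exact core_eq (PySem.Str.lower (if sintomas == "" then "" else sintomas)) _
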